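-- pv_equiv track=rewrite | github.com/codeguild2015/emails | email_mercy_cole.py | count_occurances
-- ===== SOURCE A (Python) =====
-- def count_occurances(lst):
--     """ Counts the times a name appears in the list.
--
--     Args:
--         lst - a list of strings
--
--     Return:
--         List of tuples (count, name)
--     """
--     goofy = [(lst.count(emails), emails) for emails in lst]
--     compressed = []
--     for elem in goofy:
--         if elem in compressed:
--             continue
--         else:
--             compressed.append(elem)
--     return compressed
-- ===== SOURCE B (Python) =====
-- def count_occurances(lst):
--     """Counts the times a name appears in the list; returns [(count, name)]
--     for each distinct name in first-occurrence order."""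
--     counts = {}
--     for name in lst:
--         counts[name] = counts.get(name, 0) + 1
--     return [(c, name) for name, c in counts.items()]
-- ===== Notes on version B (the rewrite author's own statement) =====
-- stated objective: faster
-- what changed: Replaces the per-element lst.count rescans and the quadratic membership-dedup loop with a single counting-dict pass followed by one pass over the dict's items in first-occurrence order.
import Mathlib
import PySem

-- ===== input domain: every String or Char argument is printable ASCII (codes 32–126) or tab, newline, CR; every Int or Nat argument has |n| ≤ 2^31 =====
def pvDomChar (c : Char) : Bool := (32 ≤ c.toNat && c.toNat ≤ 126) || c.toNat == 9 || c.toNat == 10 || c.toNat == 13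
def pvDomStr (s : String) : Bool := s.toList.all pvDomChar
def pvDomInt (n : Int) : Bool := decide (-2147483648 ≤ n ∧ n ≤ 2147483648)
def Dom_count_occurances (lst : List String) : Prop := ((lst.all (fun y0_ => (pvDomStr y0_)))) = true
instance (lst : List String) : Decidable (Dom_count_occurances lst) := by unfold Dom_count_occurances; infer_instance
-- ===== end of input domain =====

-- B replaces A's per-element lst.count rescans plus a quadratic membership-dedup loop by one
-- counting-dict pass and one pass over the dict's items (objective: faster, O(n^2) -> O(n)).

-- ===== PORT A =====
def count_occurances (lst : List String) : List (Int × String) :=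
  let goofy := lst.map (fun emails => ((PySem.List.count lst emails : Int), emails))
  let compressed : List (Int × String) := []
  goofy.foldl (fun compressed elem => if elem ∈ compressed then compressed else compressed ++ [elem]) compressed

-- ===== PORT B =====
def count_occurances_alt (lst : List String) : List (Int × String) :=
  let counts := lst.foldl (fun counts name => counts.insert name (counts.getD name 0 + 1)) (PySem.Dict.empty)
  counts.items.map (fun p => (p.2, p.1))

-- ===== PRECONDITION & SPEC =====
def Spec_count_occurances (lst : List String) (out : List (Int × String)) : Prop := out = count_occurances_alt lst
instance (lst : List String) (out : List (Int × String)) : Decidable (Spec_count_occurances lst out) := by unfold Spec_count_occurances; infer_instance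

-- ===== CLAIM (what is proved, stated in full; the proofs are below) =====
def Claim_equal_count_occurances : Prop := ∀ (lst : List String), Dom_count_occurances lst → Spec_count_occurances lst (count_occurances lst)

-- ===== LEMMAS AND PROOFS =====

-- A's membership-dedup loop is exactly the PySem.Set.add fold (∈ vs contains).
theorem foldA_eq_add_fold {α : Type} [BEq α] [LawfulBEq α] (l : List α) (s : List α) :
    l.foldl (fun acc e => if e ∈ acc then acc else acc ++ [e]) s = l.foldl PySem.Set.add s := by
  induction l generalizing s with
  | nil => rfl
  | cons x xs ih =>
      simp only [List.foldl_cons, PySem.Set.add, PySem.Set.contains_eq_listContains, List.contains_eq_mem]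
      rw [ih]
      by_cases h : x ∈ s <;> simp [h]

-- Set.ofList commutes with mapping an injective function (generalized over the accumulator).
theorem add_fold_map {α β : Type} [BEq α] [LawfulBEq α] [BEq β] [LawfulBEq β]
    (f : α → β) (hf : Function.Injective f) (l : List α) (s : List α) :
    (l.map f).foldl PySem.Set.add (s.map f) = (l.foldl PySem.Set.add s).map f := by
  induction l generalizing s with
  | nil => rfl
  | cons x xs ih =>
      simp only [List.map_cons, List.foldl_cons, PySem.Set.add, PySem.Set.contains_eq_listContains, List.contains_eq_mem]
      simp only [List.mem_map_of_injective hf]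
      by_cases h : x ∈ s
      · simp only [h, decide_true, if_true]; exact ih s
      · simp only [h, decide_false, Bool.false_eq_true, if_false]
        rw [show List.map f s ++ [f x] = List.map f (s ++ [x]) by simp]
        exact ih (s ++ [x])

-- ===== VERDICT (by name: the statement is the Claim_ definition above) =====
theorem count_occurances_spec : Claim_equal_count_occurances := by
  intro lst _
  show count_occurances lst = count_occurances_alt lst
  have hB : (lst.foldl (fun counts name => counts.insert name (counts.getD name 0 + 1))
      (PySem.Dict.empty)) = PySem.Dict.counter lst := rfl
  unfold count_occurances count_occurances_alt
  simp only [hB, PySem.Dict.items_counter, List.map_map]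
  rw [foldA_eq_add_fold]
  have hf : Function.Injective (fun e : String => ((PySem.List.count lst e : Int), e)) := by
    intro a b h
    exact congrArg Prod.snd h
  have := add_fold_map (fun e : String => ((PySem.List.count lst e : Int), e)) hf lst []
  simp only [List.map_nil] at this
  rw [this]
  show _ = List.map _ (PySem.Set.ofList lst)
  unfold PySem.Set.ofList PySem.Set.empty
  simp [PySem.List.count_eq]
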